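-- pv_equiv track=rewrite | github.com/pja2113/natural_language_processing | lectures.py | classify_body
-- ===== SOURCE A (Python) =====
-- def classify_body(body_text, topic_profiles):
--     from collections import Counter
--
--     body_words = Counter(body_text.split())
--     scores = {}
--
--     for topic, word_counter in topic_profiles.items():
--         # Score based on overlapping word frequency
--         score = sum(body_words[word] * word_counter.get(word, 0) for word in body_words)
--         scores[topic] = score
--
--     if any(scores.values()):
--         return max(scores, key=scores.get)
--     else:
--         return "unknown"
-- ===== SOURCE B (Python) =====
-- def classify_body(body_text, topic_profiles):
--     from collections import Counter
--
--     # Pre-seed in topic order so the first-max tie-break and the all-zero case match.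
--     scores = {topic: 0 for topic in topic_profiles}
--
--     # Inverted index: word -> [(topic, count), ...]
--     index = {}
--     for topic, word_counter in topic_profiles.items():
--         for word, count in word_counter.items():
--             index.setdefault(word, []).append((topic, count))
--
--     # One pass over the body's word counts, scattering into the topic scores.
--     for word, bcount in Counter(body_text.split()).items():
--         for topic, tcount in index.get(word, ()):
--             scores[topic] += bcount * tcount
--
--     if any(scores.values()):
--         return max(scores, key=scores.get)
--     return "unknown"
-- ===== Notes on version B (the rewrite author's own statement) =====
-- stated objective: alternative
-- what changed: Replaces the per-topic dot-product loops over all body words by an inverted index word -> [(topic, count)] built once from the profiles, then a single pass over the body's word counts scattering bcount*tcount into pre-seeded topic scores; per-topic score computation disappears as a loop.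
import Mathlib
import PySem

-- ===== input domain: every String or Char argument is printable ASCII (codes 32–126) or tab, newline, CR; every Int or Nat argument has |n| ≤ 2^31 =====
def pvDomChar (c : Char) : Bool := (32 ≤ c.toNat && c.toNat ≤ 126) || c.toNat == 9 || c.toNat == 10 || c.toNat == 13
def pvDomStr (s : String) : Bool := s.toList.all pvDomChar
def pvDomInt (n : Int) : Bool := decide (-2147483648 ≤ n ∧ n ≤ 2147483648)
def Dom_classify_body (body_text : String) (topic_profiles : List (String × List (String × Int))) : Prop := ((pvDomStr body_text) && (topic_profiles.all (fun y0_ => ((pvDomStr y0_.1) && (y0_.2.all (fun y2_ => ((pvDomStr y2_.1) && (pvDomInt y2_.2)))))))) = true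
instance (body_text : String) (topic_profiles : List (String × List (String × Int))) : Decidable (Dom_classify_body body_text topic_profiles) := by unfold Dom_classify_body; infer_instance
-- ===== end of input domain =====

-- B replaces A's per-topic dot-product loops over all body words by an inverted index
-- word -> [(topic, count)] built once from the profiles, then a single pass over the body's
-- word counts scattering bcount*tcount into pre-seeded topic scores (alternative decomposition,
-- same exact result).

-- ===== PORT A =====
def classify_body (body_text : String) (topic_profiles : List (String × List (String × Int))) : String :=
  let body_words : PySem.Dict String Int := PySem.Dict.counter (PySem.Str.split₀ body_text)
  -- topic_profiles is a Python dict of Counters, received as an association list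
  let tp : PySem.Dict String (PySem.Dict String Int) :=
    PySem.Dict.ofList (topic_profiles.map (fun p => (p.1, PySem.Dict.ofList p.2)))
  let scores : PySem.Dict String Int :=
    tp.items.foldl (fun sc p =>
      sc.insert p.1 ((body_words.keys.map (fun w => body_words.getD w 0 * p.2.getD w 0)).sum))
      PySem.Dict.empty
  if scores.values.any (fun v => v != 0) then
    match PySem.List.max? scores.keys (fun k => scores.getD k 0) with
    | some t => t
    | none => "unknown"   -- unreachable: under the guard scores is nonempty (Python's max never raises here)
  else "unknown"

-- ===== PORT B =====
def classify_body_alt (body_text : String) (topic_profiles : List (String × List (String × Int))) : String :=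
  -- topic_profiles is a Python dict of Counters, received as an association list
  let tp : PySem.Dict String (PySem.Dict String Int) :=
    PySem.Dict.ofList (topic_profiles.map (fun p => (p.1, PySem.Dict.ofList p.2)))
  -- scores = {topic: 0 for topic in topic_profiles}
  let scores0 : PySem.Dict String Int :=
    tp.keys.foldl (fun d t => d.insert t 0) PySem.Dict.empty
  -- index.setdefault(word, []).append((topic, count)) == modify word [] (· ++ [(topic, count)])
  let index : PySem.Dict String (List (String × Int)) :=
    tp.items.foldl (fun ix p =>
      p.2.items.foldl (fun ix q => ix.modify q.1 [] (fun l => l ++ [(p.1, q.2)])) ix)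
      PySem.Dict.empty
  -- scores[topic] += bcount * tcount: every scattered topic is pre-seeded, so the in-place
  -- update is modify topic 0 (· + bcount * tcount)
  let scores : PySem.Dict String Int :=
    (PySem.Dict.counter (PySem.Str.split₀ body_text)).items.foldl (fun sc wq =>
      (index.getD wq.1 []).foldl (fun sc tq => sc.modify tq.1 0 (fun v => v + wq.2 * tq.2)) sc)
      scores0
  if scores.values.any (fun v => v != 0) then
    match PySem.List.max? scores.keys (fun k => scores.getD k 0) with
    | some t => t
    | none => "unknown"   -- unreachable, as in port A
  else "unknown"

-- ===== PRECONDITION & SPEC =====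
def Spec_classify_body (body_text : String) (topic_profiles : List (String × List (String × Int))) (out : String) : Prop := out = classify_body_alt body_text topic_profiles
instance (body_text : String) (topic_profiles : List (String × List (String × Int))) (out : String) : Decidable (Spec_classify_body body_text topic_profiles out) := by unfold Spec_classify_body; infer_instance

-- ===== CLAIM (what is proved, stated in full; the proofs are below) =====
def Claim_equal_classify_body : Prop := ∀ (body_text : String) (topic_profiles : List (String × List (String × Int))), Dom_classify_body body_text topic_profiles → Spec_classify_body body_text topic_profiles (classify_body body_text topic_profiles)

-- ===== LEMMAS AND PROOFS =====

-- items of a dict built from an association list are among the list's pairs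
theorem pv_mem_items_update {κ ν : Type} [BEq κ] [LawfulBEq κ] (ps : List (κ × ν)) :
    ∀ (d : PySem.Dict κ ν) (p : κ × ν), p ∈ (d.update ps).items → p ∈ d.items ∨ p ∈ ps := by
  induction ps with
  | nil => intro d p h; exact Or.inl h
  | cons q ps ih =>
      intro d p h
      rcases ih (d.insert q.1 q.2) p h with h' | h'
      · rcases (PySem.Dict.mem_items_insert _ _ _ _).1 h' with h'' | h''
        · exact Or.inr (by simp [h''])
        · exact Or.inl h''.1
      · exact Or.inr (List.mem_cons_of_mem _ h')

theorem pv_mem_items_ofList {κ ν : Type} [BEq κ] [LawfulBEq κ] (ps : List (κ × ν)) (p : κ × ν)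
    (h : p ∈ (PySem.Dict.ofList ps).items) : p ∈ ps := by
  rcases pv_mem_items_update ps PySem.Dict.empty p h with h' | h'
  · simp [PySem.Dict.empty] at h'
  · exact h'

-- seeding a dict with zeros leaves every zero-default lookup at 0
theorem pv_getD_seed (t : String) :
    ∀ (l : List String) (d : PySem.Dict String Int), d.getD t 0 = 0 →
      (l.foldl (fun d x => d.insert x 0) d).getD t 0 = 0 := by
  intro l
  induction l with
  | nil => intro d h; exact h
  | cons x rest ih =>
      intro d h
      apply ih
      rw [PySem.Dict.getD_insert]
      split <;> [rfl; exact h]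

-- updating a set with elements it already has leaves it unchanged
theorem pv_set_update_self (s : List String) (xs : List String) (h : ∀ x ∈ xs, x ∈ s) :
    PySem.Set.update s xs = s := by
  rw [PySem.Set.update_eq_append_filter]
  have hnil : (PySem.Set.ofList xs).filter (fun y => !(PySem.Set.contains s y)) = [] := by
    rw [List.filter_eq_nil_iff]
    intro a ha
    have hm : a ∈ s := h a ((PySem.Set.mem_ofList xs a).1 ha)
    simpa [PySem.Set.contains_iff] using hm
  rw [hnil, List.append_nil]

-- in a list with distinct keys, filtering on a present key keeps exactly its pair
theorem pv_filter_key (w : String) (v : Int) :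
    ∀ (l : List (String × Int)), (l.map Prod.fst).Nodup → (w, v) ∈ l →
      l.filter (fun q => q.1 == w) = [(w, v)] := by
  intro l
  induction l with
  | nil => intro _ hm; cases hm
  | cons p rest ih =>
      intro hnd hm
      have hnd' : (rest.map Prod.fst).Nodup := (List.nodup_cons.1 hnd).2
      rcases List.mem_cons.1 hm with h | h
      · subst h
        have hrest : rest.filter (fun q => q.1 == w) = [] := by
          rw [List.filter_eq_nil_iff]
          intro q hq hbeq
          exact (List.nodup_cons.1 hnd).1 (by
            have h1 : q.1 ∈ rest.map Prod.fst := List.mem_map.2 ⟨q, hq, rfl⟩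
            rwa [eq_of_beq hbeq] at h1)
        simp [hrest]
      · have hne : p.1 ≠ w := by
          intro he
          exact (List.nodup_cons.1 hnd).1 (by
            rw [he]; exact List.mem_map.2 ⟨(w, v), h, rfl⟩)
        simp only [List.filter_cons]
        rw [if_neg (by simpa using hne)]
        exact ih hnd' h

-- filtering a Nodup-keyed dict's items on a key yields its (key, value) pair or nothing
theorem pv_items_filter (d : PySem.Dict String Int) (hnd : d.keys.Nodup) (w : String) :
    d.items.filter (fun q => q.1 == w) = if d.contains w then [(w, d.getD w 0)] else [] := by
  have hnd' : (d.items.map Prod.fst).Nodup := by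
    simpa [PySem.Dict.keys] using hnd
  by_cases hc : d.contains w = true
  · rw [if_pos hc]
    have hsome : ∃ v, d.get? w = some v := by
      rw [PySem.Dict.contains_eq_isSome_get?] at hc
      exact Option.isSome_iff_exists.1 hc
    obtain ⟨v, hv⟩ := hsome
    have hmem : (w, v) ∈ d.items := PySem.Dict.mem_items_of_get?_eq_some d hv
    have hgd : d.getD w 0 = v := PySem.Dict.getD_of_mem_items d hmem hnd 0
    rw [hgd]
    exact pv_filter_key w v d.items hnd' hmem
  · rw [if_neg hc]
    rw [List.filter_eq_nil_iff]
    intro q hq hbeq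
    have h1 : q.1 ∈ d.keys := PySem.Dict.mem_keys_of_mem_items d hq
    exact hc ((PySem.Dict.contains_iff_mem_keys d w).2 (by rwa [eq_of_beq hbeq] at h1))

-- a flatMap vanishing away from a unique key collapses to its value at that key
theorem pv_flatMap_single {α β : Type} (t : String) (wc : α) (f : (String × α) → List β) :
    ∀ (l : List (String × α)), (l.map Prod.fst).Nodup → (t, wc) ∈ l →
      (∀ p ∈ l, p.1 ≠ t → f p = []) → l.flatMap f = f (t, wc) := by
  intro l
  induction l with
  | nil => intro _ hm; cases hm
  | cons p rest ih =>
      intro hnd hm hz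
      have hnd' : (rest.map Prod.fst).Nodup := (List.nodup_cons.1 hnd).2
      rcases List.mem_cons.1 hm with h | h
      · subst h
        have hrest : rest.flatMap f = [] := by
          rw [List.flatMap_eq_nil_iff]
          intro q hq
          apply hz q (List.mem_cons_of_mem _ hq)
          intro he
          exact (List.nodup_cons.1 hnd).1 (by
            rw [← he]; exact List.mem_map.2 ⟨q, hq, rfl⟩)
        simp [hrest]
      · have hne : p.1 ≠ t := by
          intro he
          exact (List.nodup_cons.1 hnd).1 (by
            rw [he]; exact List.mem_map.2 ⟨(t, wc), h, rfl⟩)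
        rw [List.flatMap_cons, hz p (List.mem_cons_self) hne, List.nil_append]
        exact ih hnd' h (fun q hq => hz q (List.mem_cons_of_mem _ hq))

-- scatter-add along a list of (key, delta) pairs, read back at one key
theorem pv_scatter (g : (String × Int) → Int) :
    ∀ (lst : List (String × Int)) (d : PySem.Dict String Int) (t : String),
      (lst.foldl (fun d tq => d.modify tq.1 0 (fun v => v + g tq)) d).getD t 0
        = d.getD t 0 + ((lst.filter (fun tq => tq.1 == t)).map g).sum := by
  intro lst
  induction lst with
  | nil => intro d t; simp
  | cons tq rest ih =>
      intro d t
      rw [List.foldl_cons, ih, PySem.Dict.getD_modify, List.filter_cons]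
      by_cases h : t = tq.1
      · subst h
        simp
        ring
      · have h2 : (tq.1 == t) = false := by simpa using fun he => h he.symm
        simp [if_neg h, h2]

-- the nested body-pass scatter, read back at one topic
theorem pv_scatter2 (ix : PySem.Dict String (List (String × Int))) :
    ∀ (lst : List (String × Int)) (d : PySem.Dict String Int) (t : String),
      (lst.foldl (fun sc wq =>
          (ix.getD wq.1 []).foldl (fun sc tq => sc.modify tq.1 0 (fun v => v + wq.2 * tq.2)) sc) d).getD t 0
        = d.getD t 0
          + (lst.map (fun wq =>
              (((ix.getD wq.1 []).filter (fun tq => tq.1 == t)).map (fun tq => wq.2 * tq.2)).sum)).sum := by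
  intro lst
  induction lst with
  | nil => intro d t; simp
  | cons wq rest ih =>
      intro d t
      rw [List.foldl_cons, ih, pv_scatter (fun tq => wq.2 * tq.2)]
      simp [add_assoc]

-- THE CORE: B's seeded inverted-index scatter builds exactly A's scores dict
theorem pv_scores_eq (bw : PySem.Dict String Int) (tpd : PySem.Dict String (PySem.Dict String Int))
    (hbw : bw.keys.Nodup) (htp : tpd.keys.Nodup) (hv : ∀ p ∈ tpd.items, p.2.keys.Nodup) :
    bw.items.foldl (fun sc wq =>
        ((tpd.items.foldl (fun ix p =>
            p.2.items.foldl (fun ix q => ix.modify q.1 [] (fun l => l ++ [(p.1, q.2)])) ix)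
          PySem.Dict.empty).getD wq.1 []).foldl
          (fun sc tq => sc.modify tq.1 0 (fun v => v + wq.2 * tq.2)) sc)
      (tpd.keys.foldl (fun d t => d.insert t 0) PySem.Dict.empty)
    = tpd.items.foldl (fun sc p =>
        sc.insert p.1 ((bw.keys.map (fun w => bw.getD w 0 * p.2.getD w 0)).sum)) PySem.Dict.empty := by
  have htp' : (tpd.items.map Prod.fst).Nodup := by
    simpa [PySem.Dict.keys] using htp
  set seed : PySem.Dict String Int :=
    tpd.keys.foldl (fun d t => d.insert t 0) PySem.Dict.empty with hseed
  set ix : PySem.Dict String (List (String × Int)) :=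
    tpd.items.foldl (fun ix p =>
      p.2.items.foldl (fun ix q => ix.modify q.1 [] (fun l => l ++ [(p.1, q.2)])) ix)
      PySem.Dict.empty with hix
  set SB : PySem.Dict String Int :=
    bw.items.foldl (fun sc wq =>
      (ix.getD wq.1 []).foldl (fun sc tq => sc.modify tq.1 0 (fun v => v + wq.2 * tq.2)) sc)
      seed with hSB
  -- the inverted-index builder, flattened to one fold over (word, (topic, count)) triples
  have hixflat : ix = (tpd.items.flatMap (fun p => p.2.items.map (fun q => (q.1, (p.1, q.2))))).foldl
      (fun d e => d.modify e.1 [] (fun l => l ++ [e.2])) PySem.Dict.empty := by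
    rw [hix, List.foldl_flatMap]
    simp only [List.foldl_map]
  have hgetD : ∀ w, ix.getD w []
      = ((tpd.items.flatMap (fun p => p.2.items.map (fun q => (q.1, (p.1, q.2))))).filter
          (fun e => e.1 == w)).map (fun e => e.2) := by
    intro w
    rw [hixflat, PySem.Dict.getD_foldl_modify_append, PySem.Dict.getD_empty, List.nil_append]
  -- per-(topic, word) content of an index entry
  have hfilterS : ∀ (t : String) (wc : PySem.Dict String Int), (t, wc) ∈ tpd.items → ∀ (w : String),
      (ix.getD w []).filter (fun tq => tq.1 == t)
        = if wc.contains w then [(t, wc.getD w 0)] else [] := by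
    intro t wc hm w
    rw [hgetD w, List.filter_map, List.filter_filter, List.filter_flatMap]
    have hstep : ∀ p : String × PySem.Dict String Int,
        ((p.2.items.map (fun q => (q.1, (p.1, q.2)))).filter
            (fun e => ((fun tq : String × Int => tq.1 == t) ∘ (fun e : String × (String × Int) => e.2)) e && e.1 == w))
          = (p.2.items.filter (fun q => (p.1 == t) && (q.1 == w))).map (fun q => (q.1, (p.1, q.2))) := by
      intro p
      rw [List.filter_map]
      congr 1
    simp only [hstep, List.map_flatMap, List.map_map]
    rw [pv_flatMap_single t wc
      (fun p => List.map ((fun e : String × String × Int => e.2) ∘ fun q : String × Int => (q.1, p.1, q.2))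
        (List.filter (fun q : String × Int => p.1 == t && q.1 == w) p.2.items))
      tpd.items htp' hm ?hz]
    case hz =>
      intro p _ hne
      have hpt : (p.1 == t) = false := by simpa using hne
      simp [hpt]
    simp only [beq_self_eq_true, Bool.true_and]
    rw [pv_items_filter wc (hv (t, wc) hm) w]
    by_cases hc : wc.contains w = true
    · simp [hc]
    · simp [hc]
  -- B's final score at each topic is A's dot product
  have hgB : ∀ (t : String) (wc : PySem.Dict String Int), (t, wc) ∈ tpd.items →
      SB.getD t 0 = (bw.keys.map (fun w => bw.getD w 0 * wc.getD w 0)).sum := by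
    intro t wc hm
    rw [hSB, pv_scatter2 ix bw.items seed t, hseed,
      pv_getD_seed t tpd.keys PySem.Dict.empty (PySem.Dict.getD_empty _ _), zero_add]
    simp only [PySem.Dict.keys, List.map_map]
    congr 1
    apply List.map_congr_left
    intro wq hwq
    rw [hfilterS t wc hm wq.1]
    obtain ⟨a, b⟩ := wq
    have hga : bw.getD a 0 = b := PySem.Dict.getD_of_mem_items bw hwq hbw 0
    by_cases hc : wc.contains a = true
    · simp [hc, hga]
    · simp only [Bool.not_eq_true] at hc
      simp [hc, PySem.Dict.getD_of_not_contains wc 0 hc, hga]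
  -- the scatter never touches a key outside the seeded topic set
  have hflatB : SB = (bw.items.flatMap (fun wq => (ix.getD wq.1 []).map (fun tq => (tq.1, wq.2 * tq.2)))).foldl
      (fun d e => d.modify e.1 0 (fun v => v + e.2)) seed := by
    rw [hSB, List.foldl_flatMap]
    simp only [List.foldl_map]
  have hseedkeys : seed.keys = tpd.keys := by
    calc seed.keys = PySem.Set.update (PySem.Dict.empty : PySem.Dict String Int).keys tpd.keys := by
          rw [hseed]; exact PySem.Dict.keys_foldl_insert tpd.keys (fun _ _ => (0 : Int)) PySem.Dict.empty
      _ = tpd.keys := by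
          rw [PySem.Dict.keys_empty, PySem.Set.update_nil_left, PySem.Set.ofList_eq_self_of_nodup _ htp]
  have hkeysB : SB.keys = tpd.keys := by
    have hkeys2 : SB.keys = PySem.Set.update seed.keys
        ((bw.items.flatMap (fun wq => (ix.getD wq.1 []).map (fun tq => (tq.1, wq.2 * tq.2)))).map Prod.fst) := by
      rw [hflatB]
      exact PySem.Dict.keys_foldl_modify_key _ Prod.fst 0 (fun _ e v => v + e.2) seed
    have hmemE : ∀ x ∈ (bw.items.flatMap (fun wq => (ix.getD wq.1 []).map (fun tq => (tq.1, wq.2 * tq.2)))).map Prod.fst,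
        x ∈ tpd.keys := by
      intro x hx
      simp only [List.mem_map, List.mem_flatMap] at hx
      obtain ⟨e, ⟨wq, hwq, tq, htq, rfl⟩, rfl⟩ := hx
      rw [hgetD wq.1] at htq
      obtain ⟨e0, he0, rfl⟩ := List.mem_map.1 htq
      have he0' := (List.mem_filter.1 he0).1
      obtain ⟨p, hp, he0''⟩ := List.mem_flatMap.1 he0'
      obtain ⟨q, hq, rfl⟩ := List.mem_map.1 he0''
      simpa using PySem.Dict.mem_keys_of_mem_items tpd hp
    rw [hkeys2, hseedkeys]
    exact pv_set_update_self tpd.keys _ hmemE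
  -- assemble: the two dicts have the same items list
  apply PySem.Dict.ext
  have hnodB : SB.keys.Nodup := by rw [hkeysB]; exact htp
  have hitemsA : (tpd.items.foldl (fun sc p =>
      sc.insert p.1 ((bw.keys.map (fun w => bw.getD w 0 * p.2.getD w 0)).sum)) PySem.Dict.empty).items
      = tpd.items.map (fun p => (p.1, (bw.keys.map (fun w => bw.getD w 0 * p.2.getD w 0)).sum)) := by
    rw [PySem.Dict.items_foldl_insert_fresh tpd.items (fun p => p.1)
      (fun p => (bw.keys.map (fun w => bw.getD w 0 * p.2.getD w 0)).sum) PySem.Dict.empty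
      (fun a _ => PySem.Dict.contains_empty a.1) htp']
    rfl
  rw [hitemsA, PySem.Dict.items_eq_map_keys SB hnodB 0, hkeysB]
  simp only [PySem.Dict.keys, List.map_map]
  apply List.map_congr_left
  intro p hp
  obtain ⟨a, b⟩ := p
  have := hgB a b hp
  simp only [Function.comp_apply]
  rw [this]
  simp only [PySem.Dict.keys, List.map_map]

-- ===== VERDICT (by name: the statement is the Claim_ definition above) =====
theorem classify_body_spec : Claim_equal_classify_body := by
  intro body_text topic_profiles _
  unfold Spec_classify_body classify_body classify_body_alt
  simp only []
  rw [pv_scores_eq (PySem.Dict.counter (PySem.Str.split₀ body_text))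
    (PySem.Dict.ofList (topic_profiles.map (fun p => (p.1, PySem.Dict.ofList p.2))))
    (PySem.Dict.nodup_keys_counter _) (PySem.Dict.nodup_keys_ofList _)
    (by
      intro p hp
      rcases List.mem_map.1 (pv_mem_items_ofList _ p hp) with ⟨q, _, rfl⟩
      exact PySem.Dict.nodup_keys_ofList _)]
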